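-- pv_equiv track=rewrite | github.com/Golden-Ducks/tp1-task-Chadiamou | TP1/task.py | fct
-- ===== SOURCE A (Python) =====
-- def fct(b):
--     number_words = {
--         '0':'zero', '1': 'one', '2': 'two', '3': 'three', '4': 'four',
--         '5': 'five', '6': 'six', '7': 'seven', '8': 'eight', '9': 'nine',
--         '10': 'ten'
--     }
--     for k, d in number_words.items():
--         b = b.replace(k, d)
--     punctuation = "!()-[]{};:,<>./?@#$%^&*_~'\""
--     for c in punctuation:
--         b = b.replace(c, "")
--     words = b.split()
--     return words
-- ===== SOURCE B (Python) =====
-- def fct(b):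
--     words = {
--         '0': 'zero', '1': 'one', '2': 'two', '3': 'three', '4': 'four',
--         '5': 'five', '6': 'six', '7': 'seven', '8': 'eight', '9': 'nine'
--     }
--     punctuation = set("!()-[]{};:,<>./?@#$%^&*_~'\"")
--     return ''.join(words.get(ch, ch) for ch in b if ch not in punctuation).split()
-- ===== Notes on version B (the rewrite author's own statement) =====
-- stated objective: alternative
-- what changed: Replaces A's ~40 sequential full-string str.replace passes (digit-to-word rules, the dead '10' rule, per-character punctuation removal) by a single per-character pass that emits the digit's word, drops punctuation and keeps any other character, joined once and split.
import Mathlib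
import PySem

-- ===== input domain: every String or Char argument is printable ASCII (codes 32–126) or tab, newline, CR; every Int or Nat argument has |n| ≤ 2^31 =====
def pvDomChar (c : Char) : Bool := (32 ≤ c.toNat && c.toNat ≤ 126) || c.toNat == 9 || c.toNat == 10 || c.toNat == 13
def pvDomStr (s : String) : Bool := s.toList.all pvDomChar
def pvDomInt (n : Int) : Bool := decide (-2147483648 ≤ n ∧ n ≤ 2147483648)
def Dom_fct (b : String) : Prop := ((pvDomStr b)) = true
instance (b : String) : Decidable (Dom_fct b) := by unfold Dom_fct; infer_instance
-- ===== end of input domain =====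

-- B replaces A's ~40 sequential full-string `.replace` passes by a single per-character pass
-- (digit → word, punctuation dropped, others kept), joined once and split (objective: alternative single-pass algorithm).

-- ===== PORT A =====
def fct (b : String) : List String :=
  let numberWords : PySem.Dict String String := PySem.Dict.ofList
    [("0","zero"),("1","one"),("2","two"),("3","three"),("4","four"),
     ("5","five"),("6","six"),("7","seven"),("8","eight"),("9","nine"),("10","ten")]
  let b1 := numberWords.items.foldl (fun s kd => PySem.Str.replace s kd.1 kd.2) b
  let punctuation : String := "!()-[]{};:,<>./?@#$%^&*_~'\""
  let b2 := punctuation.toList.foldl (fun s c => PySem.Str.replace s (String.ofList [c]) "") b1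
  PySem.Str.split₀ b2

-- ===== PORT B =====
def fct_alt (b : String) : List String :=
  let words : PySem.Dict Char String := PySem.Dict.ofList
    [('0',"zero"),('1',"one"),('2',"two"),('3',"three"),('4',"four"),
     ('5',"five"),('6',"six"),('7',"seven"),('8',"eight"),('9',"nine")]
  let punctuation : PySem.Set Char := PySem.Set.ofList "!()-[]{};:,<>./?@#$%^&*_~'\"".toList
  PySem.Str.split₀ (PySem.Str.join ""
    ((b.toList.filter (fun ch => !(PySem.Set.contains punctuation ch))).map
      (fun ch => words.getD ch (String.ofList [ch]))))

-- ===== PRECONDITION & SPEC =====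
def Spec_fct (b : String) (out : List String) : Prop := out = fct_alt b
instance (b : String) (out : List String) : Decidable (Spec_fct b out) := by unfold Spec_fct; infer_instance

-- ===== CLAIM (what is proved, stated in full; the proofs are below) =====
def Claim_equal_fct : Prop := ∀ (b : String), Dom_fct b → Spec_fct b (fct b)

-- ===== LEMMAS AND PROOFS =====

-- replacing a single character k by w is a flatMap over the characters
def applyRule (k : Char) (w : List Char) (s : List Char) : List Char :=
  s.flatMap (fun c => if c = k then w else [c])

def lookupConv (rules : List (Char × List Char)) (c : Char) : List Char :=
  match rules.find? (fun r => r.1 == c) with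
  | some r => r.2
  | none => [c]

-- no replacement output contains any replacement key (so passes do not interfere)
def RulesClosed (rules : List (Char × List Char)) : Prop :=
  ∀ r ∈ rules, ∀ r' ∈ rules, ∀ c ∈ r.2, c ≠ r'.1

theorem rulesClosed_of_all (rules : List (Char × List Char))
    (h : (rules.all (fun r => rules.all (fun r' => r.2.all (fun c => c != r'.1)))) = true) :
    RulesClosed rules := by
  simp only [List.all_eq_true, bne_iff_ne] at h
  exact h

-- the ten digit rules of A, at character level
def punctChars : List Char := "!()-[]{};:,<>./?@#$%^&*_~'\"".toList

def wordsItems : List (Char × String) :=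
  [('0',"zero"),('1',"one"),('2',"two"),('3',"three"),('4',"four"),
   ('5',"five"),('6',"six"),('7',"seven"),('8',"eight"),('9',"nine")]

def wordsDict : PySem.Dict Char String := PySem.Dict.ofList wordsItems

def digitRules : List (Char × List Char) := wordsItems.map (fun p => (p.1, p.2.toList))

-- B's per-character conversion
def convB (c : Char) : List Char :=
  if punctChars.contains c then [] else (wordsDict.getD c (String.ofList [c])).toList

def punctRules : List (Char × List Char) := punctChars.map (fun k => (k, []))

theorem go_single (k : Char) (w : List Char) (l : List Char) :
    ∀ (fuel : Nat) (acc : List Char), l.length ≤ fuel →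
      PySem.Chars.replace.go [k] w fuel l acc = acc.reverse ++ applyRule k w l := by
  induction l with
  | nil =>
    intro fuel acc _
    cases fuel <;> simp [PySem.Chars.replace.go, applyRule]
  | cons c t ih =>
    intro fuel acc h
    cases fuel with
    | zero => simp at h
    | succ f =>
      by_cases hc : c = k
      · subst hc
        rw [PySem.Chars.replace.go]
        have hp : ([c].isPrefixOf (c :: t)) = true := by simp [List.isPrefixOf]
        rw [hp, if_pos rfl]
        have hd : List.drop [c].length (c :: t) = t := rfl
        rw [hd, ih f (w.reverse ++ acc) (by simpa using h)]
        simp [applyRule]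
      · rw [PySem.Chars.replace.go]
        have hp : ([k].isPrefixOf (c :: t)) = false := by
          simp [List.isPrefixOf]; exact fun h' => absurd h'.symm hc
        rw [hp, if_neg (by simp)]
        rw [ih f (c :: acc) (by simpa using h)]
        simp [applyRule, hc]

theorem replace_single (s : List Char) (k : Char) (w : List Char) :
    PySem.Chars.replace s [k] w = applyRule k w s := by
  rw [PySem.Chars.replace]
  simp only [List.isEmpty_cons]
  simpa using go_single k w s s.length [] le_rfl

theorem go_ten_id (w : List Char) (l : List Char) :
    ∀ (fuel : Nat) (acc : List Char), l.length ≤ fuel → '1' ∉ l →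
      PySem.Chars.replace.go ['1','0'] w fuel l acc = acc.reverse ++ l := by
  induction l with
  | nil =>
    intro fuel acc _ _
    cases fuel <;> simp [PySem.Chars.replace.go]
  | cons c t ih =>
    intro fuel acc h hm
    cases fuel with
    | zero => simp at h
    | succ f =>
      rw [PySem.Chars.replace.go]
      have hc : c ≠ '1' := fun h' => hm (h' ▸ List.mem_cons_self)
      have hp : (['1','0'].isPrefixOf (c :: t)) = false := by
        simp [List.isPrefixOf]
        intro h'; exact absurd h'.symm hc
      rw [hp, if_neg (by simp)]
      rw [ih f (c :: acc) (by simpa using h) (fun h' => hm (List.mem_cons_of_mem _ h'))]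
      simp

theorem replace_ten_id (s : List Char) (w : List Char) (h : '1' ∉ s) :
    PySem.Chars.replace s ['1','0'] w = s := by
  rw [PySem.Chars.replace]
  simp only [List.isEmpty_cons]
  simpa using go_ten_id w s s.length [] le_rfl h

theorem lookupConv_of_not_key (rules : List (Char × List Char)) (c : Char)
    (h : ∀ r ∈ rules, c ≠ r.1) : lookupConv rules c = [c] := by
  unfold lookupConv
  have : rules.find? (fun r => r.1 == c) = none :=
    List.find?_eq_none.2 (fun r hr => by simpa using (h r hr).symm)
  rw [this]

theorem foldl_applyRule (rules : List (Char × List Char)) (h : RulesClosed rules) :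
    ∀ s : List Char,
      rules.foldl (fun s r => applyRule r.1 r.2 s) s = s.flatMap (lookupConv rules) := by
  induction rules with
  | nil =>
    intro s
    simp only [List.foldl_nil]
    exact ((List.flatMap_congr (fun c _ => (rfl : lookupConv [] c = [c]))).trans
      (List.flatMap_singleton' s)).symm
  | cons r rs ih =>
    intro s
    have hrs : RulesClosed rs := fun a ha b hb => h a (List.mem_cons_of_mem _ ha) b (List.mem_cons_of_mem _ hb)
    rw [List.foldl_cons, ih hrs, applyRule, List.flatMap_assoc]
    apply List.flatMap_congr
    intro c _
    by_cases hc : c = r.1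
    · subst hc
      simp only [if_true]
      have hout : ∀ x ∈ r.2, lookupConv rs x = [x] := by
        intro x hx
        exact lookupConv_of_not_key rs x
          (fun r' hr' => h r List.mem_cons_self r' (List.mem_cons_of_mem _ hr') x hx)
      rw [List.flatMap_congr hout, List.flatMap_singleton']
      unfold lookupConv
      simp [List.find?_cons_of_pos]
    · simp only [if_neg hc, List.flatMap_singleton]
      unfold lookupConv
      rw [List.find?_cons_of_neg]
      simpa using fun h' => absurd h'.symm hc

theorem key_not_mem_flatMap (rules : List (Char × List Char)) (h : RulesClosed rules)
    (k : Char) (hk : k ∈ rules.map Prod.fst) (s : List Char) :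
    k ∉ s.flatMap (lookupConv rules) := by
  intro hmem
  rcases List.mem_flatMap.1 hmem with ⟨c, _, hc⟩
  obtain ⟨r', hr', hk'⟩ := List.mem_map.1 hk
  unfold lookupConv at hc
  rcases hfind : rules.find? (fun r => r.1 == c) with _ | r
  · rw [hfind] at hc
    have := List.find?_eq_none.1 hfind r' hr'
    simp at this hc
    exact this (hk' ▸ hc ▸ rfl)
  · rw [hfind] at hc
    simp at hc
    exact h r (List.mem_of_find?_eq_some hfind) r' hr' k hc hk'.symm

-- the character-level pipeline of A equals one flatMap

theorem chain_eq (s : List Char) :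
    punctChars.foldl (fun s c => PySem.Chars.replace s [c] [])
      (PySem.Chars.replace
        (digitRules.foldl (fun s r => PySem.Chars.replace s [r.1] r.2) s)
        ['1','0'] "ten".toList)
      = s.flatMap (fun c => (lookupConv digitRules c).flatMap (lookupConv punctRules)) := by
  have hD : RulesClosed digitRules := rulesClosed_of_all _ (by decide)
  have hP : RulesClosed punctRules := rulesClosed_of_all _ (by decide)
  have h1 : digitRules.foldl (fun s r => PySem.Chars.replace s [r.1] r.2) s
      = s.flatMap (lookupConv digitRules) := by
    rw [PySem.List.foldl_congr_mem _ _ _ _ (fun acc r _ => replace_single acc r.1 r.2)]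
    exact foldl_applyRule digitRules hD s
  rw [h1, replace_ten_id _ _ (key_not_mem_flatMap digitRules hD '1' (by decide) s)]
  have h2 : punctChars.foldl (fun s c => PySem.Chars.replace s [c] []) (s.flatMap (lookupConv digitRules))
      = punctRules.foldl (fun s r => applyRule r.1 r.2 s) (s.flatMap (lookupConv digitRules)) := by
    rw [punctRules, List.foldl_map]
    exact PySem.List.foldl_congr_mem _ _ _ _ (fun acc c _ => replace_single acc c [])
  rw [h2, foldl_applyRule punctRules hP, List.flatMap_assoc]

-- lifting the string-level folds of the ports to character level
theorem foldl_replace_pairs_toList (l : List (String × String)) (b : String) :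
    (l.foldl (fun s kd => PySem.Str.replace s kd.1 kd.2) b).toList
      = l.foldl (fun cs kd => PySem.Chars.replace cs kd.1.toList kd.2.toList) b.toList := by
  induction l generalizing b with
  | nil => rfl
  | cons p t ih =>
    rw [List.foldl_cons, List.foldl_cons, ih, PySem.Str.toList_replace]

theorem foldl_replace_chars_toList (l : List Char) (s : String) :
    (l.foldl (fun s c => PySem.Str.replace s (String.ofList [c]) "") s).toList
      = l.foldl (fun cs c => PySem.Chars.replace cs [c] []) s.toList := by
  induction l generalizing s with
  | nil => rfl
  | cons c t ih =>
    rw [List.foldl_cons, List.foldl_cons, ih, PySem.Str.toList_replace, String.toList_ofList]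
    rfl

set_option maxHeartbeats 1000000 in
theorem A_chars (b : String) :
    fct b = (PySem.Chars.split₀
      (punctChars.foldl (fun s c => PySem.Chars.replace s [c] [])
        (PySem.Chars.replace
          (digitRules.foldl (fun s r => PySem.Chars.replace s [r.1] r.2) b.toList)
          ['1','0'] "ten".toList))).map String.ofList := by
  unfold fct
  simp only [PySem.Str.split₀]
  refine congrArg _ (congrArg _ ?_)
  rw [foldl_replace_chars_toList, foldl_replace_pairs_toList,
    show (PySem.Dict.ofList
        [("0","zero"),("1","one"),("2","two"),("3","three"),("4","four"),
         ("5","five"),("6","six"),("7","seven"),("8","eight"),("9","nine"),("10","ten")]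
        : PySem.Dict String String).items
      = [("0","zero"),("1","one"),("2","two"),("3","three"),("4","four"),
         ("5","five"),("6","six"),("7","seven"),("8","eight"),("9","nine"),("10","ten")] from by decide]
  simp [digitRules, wordsItems, punctChars]

theorem join_empty_flatten (ls : List (List Char)) : PySem.Chars.join [] ls = ls.flatten := by
  induction ls with
  | nil => rfl
  | cons h t ih =>
    cases t with
    | nil => simp [PySem.Chars.join, List.intercalate]
    | cons b t2 => simp_all [PySem.Chars.join, List.intercalate]

theorem filter_flatMap (p : Char → Bool) (g : Char → List Char) (l : List Char) :
    (l.filter p).flatMap g = l.flatMap (fun c => if p c then g c else []) := by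
  induction l with
  | nil => rfl
  | cons h t ih => by_cases hp : p h <;> simp [hp, ih]

set_option maxHeartbeats 1000000 in
theorem B_chars (b : String) :
    fct_alt b = (PySem.Chars.split₀ (b.toList.flatMap convB)).map String.ofList := by
  unfold fct_alt
  simp only [PySem.Str.split₀]
  refine congrArg _ (congrArg _ ?_)
  rw [PySem.Str.toList_join, show ("" : String).toList = [] from rfl, List.map_map,
    join_empty_flatten, ← List.flatMap_def, filter_flatMap]
  show b.toList.flatMap
      (fun c => if (!punctChars.contains c) = true then (wordsDict.getD c (String.ofList [c])).toList else [])
      = b.toList.flatMap convB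
  apply List.flatMap_congr
  intro c _
  simp [convB]

theorem find?_keymap (ks : List Char) (c : Char) :
    ((ks.map (fun k => (k, ([] : List Char)))).find? (fun r => r.1 == c))
      = (if ks.contains c then some (c, []) else none) := by
  induction ks with
  | nil => rfl
  | cons k t ih =>
    by_cases hk : k = c
    · simp [hk]
    · have hk' : ¬ c = k := fun h => hk h.symm
      simp [hk, hk', ih]

theorem lookupP_of_not_mem (c : Char) (hc : punctChars.contains c = false) :
    lookupConv punctRules c = [c] := by
  unfold lookupConv punctRules
  rw [find?_keymap, if_neg (by simpa using hc)]

theorem lookupP_of_mem (c : Char) (hc : punctChars.contains c = true) :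
    lookupConv punctRules c = [] := by
  unfold lookupConv punctRules
  rw [find?_keymap, if_pos (by simpa using hc)]

theorem conv_eq (c : Char) :
    (lookupConv digitRules c).flatMap (lookupConv punctRules) = convB c := by
  have hfd : digitRules.find? (fun r => r.1 == c)
      = (wordsItems.find? (fun p => p.1 == c)).map (fun p => (p.1, p.2.toList)) :=
    List.find?_map
  have hget : wordsDict.get? c = (wordsItems.find? (fun p => p.1 == c)).map (fun p => p.2) := rfl
  by_cases hc : punctChars.contains c = true
  · have hd : digitRules.find? (fun r => r.1 == c) = none := by
      apply List.find?_eq_none.2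
      intro r hr hb
      have h1 : r.1 = c := by simpa using hb
      have hall : digitRules.all (fun r => !punctChars.contains r.1) = true := by decide
      have h2 : (!punctChars.contains r.1) = true := List.all_eq_true.1 hall r hr
      rw [h1, hc] at h2
      simp at h2
    rw [show lookupConv digitRules c = [c] from by unfold lookupConv; rw [hd]]
    rw [List.flatMap_singleton, lookupP_of_mem c hc, convB, if_pos hc]
  · have hc' : punctChars.contains c = false := by simpa using hc
    rcases hq : wordsItems.find? (fun p => p.1 == c) with _ | p
    · rw [show lookupConv digitRules c = [c] from by unfold lookupConv; rw [hfd, hq]; rfl]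
      rw [List.flatMap_singleton, lookupP_of_not_mem c hc']
      rw [convB, if_neg hc, PySem.Dict.getD, hget, hq]
      simp
    · rw [show lookupConv digitRules c = p.2.toList from by unfold lookupConv; rw [hfd, hq]; rfl]
      have hout : ∀ x ∈ p.2.toList, lookupConv punctRules x = [x] := by
        intro x hx
        apply lookupP_of_not_mem
        have hmem := List.mem_of_find?_eq_some hq
        have hall : wordsItems.all (fun p => p.2.toList.all (fun x => !punctChars.contains x)) = true := by
          decide
        have h1 := List.all_eq_true.1 hall p hmem
        have h2 := List.all_eq_true.1 h1 x hx
        simpa using h2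
      rw [List.flatMap_congr hout, List.flatMap_singleton']
      rw [convB, if_neg hc, PySem.Dict.getD, hget, hq]
      rfl

-- ===== VERDICT (by name: the statement is the Claim_ definition above) =====
theorem fct_spec : Claim_equal_fct := by
  intro b _
  unfold Spec_fct
  rw [A_chars b, chain_eq,
    show b.toList.flatMap (fun c => (lookupConv digitRules c).flatMap (lookupConv punctRules))
        = b.toList.flatMap convB from List.flatMap_congr (fun c _ => conv_eq c),
    ← B_chars b]
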